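-- pv_equiv track=rewrite | github.com/gaderian/AoC2019 | day4/day4.py | hasDouble
-- ===== SOURCE A (Python) =====
-- def hasDouble(list):
--     i=0
--     while i < len(list)-1:
--         lookahead = 1
--         matched=0
--         while True:
--             if i+lookahead > len(list)-1:
--                 break
--             if list[i] == list[i+lookahead]:
--                 matched+=1
--                 lookahead+=1
--             else:
--                 break
--         if matched == 1:
--             return True
--         i+=lookahead
--     return False
-- ===== SOURCE B (Python) =====
-- def hasDouble(list):
--     prev = 0
--     count = 0
--     for x in list:
--         if count != 0 and x == prev:
--             count += 1
--         else:
--             if count == 2: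
--                 return True
--             prev = x
--             count = 1
--     return count == 2
-- ===== Notes on version B (the rewrite author's own statement) =====
-- stated objective: simpler
-- what changed: Replaced A's nested while loops with index-jumping (i += lookahead) by a single forward pass maintaining the current run's value and length, checking for a run of length exactly 2 at each run boundary and at the end.
import Mathlib
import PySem

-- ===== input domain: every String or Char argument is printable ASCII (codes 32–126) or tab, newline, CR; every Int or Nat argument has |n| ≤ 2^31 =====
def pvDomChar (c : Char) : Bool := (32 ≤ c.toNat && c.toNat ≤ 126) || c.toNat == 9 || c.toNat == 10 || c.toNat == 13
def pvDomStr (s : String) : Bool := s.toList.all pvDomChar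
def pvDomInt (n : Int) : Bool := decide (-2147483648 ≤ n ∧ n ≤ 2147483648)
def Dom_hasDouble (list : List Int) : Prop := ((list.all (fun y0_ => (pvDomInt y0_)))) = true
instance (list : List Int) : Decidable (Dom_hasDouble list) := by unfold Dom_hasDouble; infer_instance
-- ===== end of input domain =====

-- B replaces A's nested index-jumping while loops by a single structural pass
-- tracking the current run's value and length (objective: simpler).

-- ===== PORT A =====
-- inner `while True` loop of A: state (lookahead, matched), returns (matched, lookahead).
-- The fuel argument only makes the loop total: each iteration needs i+lookahead ≤ len-1
-- and increments lookahead, so `l.length` fuel is never exhausted at the call site below.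
def loopInnerA (l : List Int) (i : Nat) : Nat → Nat → Nat → Nat × Nat
  | 0, la, m => (m, la)
  | Nat.succ fuel, la, m =>
    if i + la > l.length - 1 then (m, la)
    else if l.getD i 0 == l.getD (i + la) 0 then loopInnerA l i fuel (la + 1) (m + 1)
    else (m, la)

-- outer `while i < len(list)-1` loop of A; i grows by lookahead ≥ 1 each iteration,
-- so `l.length + 1` fuel is never exhausted at the call site below.
def loopOuterA (l : List Int) : Nat → Nat → Bool
  | 0, _ => false
  | Nat.succ fuel, i =>
    if i < l.length - 1 then
      if (loopInnerA l i l.length 1 0).1 == 1 then true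
      else loopOuterA l fuel (i + (loopInnerA l i l.length 1 0).2)
    else false

def hasDouble (list : List Int) : Bool := loopOuterA list (list.length + 1) 0

-- ===== PORT B =====
-- B's single for-loop: state (prev, count); on [] the final `return count == 2`
def loopB : List Int → Int → Nat → Bool
  | [], _, count => count == 2
  | x :: rest, prev, count =>
    if count != 0 && x == prev then loopB rest prev (count + 1)
    else if count == 2 then true
    else loopB rest x 1

def hasDouble_alt (list : List Int) : Bool := loopB list 0 0

-- ===== PRECONDITION & SPEC =====
def Spec_hasDouble (list : List Int) (out : Bool) : Prop := out = hasDouble_alt list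
instance (list : List Int) (out : Bool) : Decidable (Spec_hasDouble list out) := by unfold Spec_hasDouble; infer_instance

-- ===== CLAIM (what is proved, stated in full; the proofs are below) =====
def Claim_equal_hasDouble : Prop := ∀ (list : List Int), Dom_hasDouble list → Spec_hasDouble list (hasDouble list)

-- ===== LEMMAS AND PROOFS =====

-- length of the leading run of elements equal to x
def runLen (x : Int) : List Int → Nat
  | [] => 0
  | y :: ys => if y == x then runLen x ys + 1 else 0

-- reference run-by-run scan both ports are reduced to (fuel-indexed, then fixed fuel)
def gRunsF : Nat → List Int → Bool
  | 0, _ => false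
  | Nat.succ _, [] => false
  | Nat.succ fuel, x :: rest =>
    if runLen x rest = 1 then true else gRunsF fuel (rest.drop (runLen x rest))

def gRuns (l : List Int) : Bool := gRunsF (l.length + 1) l

theorem gRunsF_congr (fuel : Nat) : ∀ (fuel' : Nat) (l : List Int),
    l.length < fuel → l.length < fuel' → gRunsF fuel l = gRunsF fuel' l := by
  induction fuel with
  | zero => intro fuel' l h _; omega
  | succ fuel ih =>
    intro fuel' l h h'
    match fuel', l with
    | 0, l => omega
    | fuel' + 1, [] => rfl
    | fuel' + 1, x :: rest =>
      simp only [gRunsF]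
      by_cases h1 : runLen x rest = 1
      · simp [h1]
      · rw [if_neg h1, if_neg h1]
        have hd : (rest.drop (runLen x rest)).length ≤ rest.length := by
          simp only [List.length_drop]; omega
        simp only [List.length_cons] at h h'
        exact ih fuel' (rest.drop (runLen x rest)) (by omega) (by omega)

theorem gRuns_cons (x : Int) (t : List Int) :
    gRuns (x :: t) = if runLen x t = 1 then true else gRuns (t.drop (runLen x t)) := by
  show gRunsF ((x :: t).length + 1) (x :: t) = _
  simp only [List.length_cons, gRunsF]
  by_cases h1 : runLen x t = 1
  · simp [h1]
  · rw [if_neg h1, if_neg h1]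
    apply gRunsF_congr
    · simp only [List.length_drop]; omega
    · simp only [List.length_drop]; omega

theorem loopInnerA_eq (l : List Int) (i : Nat) (hi : i < l.length) :
    ∀ (fuel la m : Nat), l.length - (i + la) < fuel →
      loopInnerA l i fuel la m =
        (m + runLen (l.getD i 0) (l.drop (i + la)),
         la + runLen (l.getD i 0) (l.drop (i + la))) := by
  intro fuel
  induction fuel with
  | zero => intro la m h; omega
  | succ fuel ih =>
    intro la m hfuel
    simp only [loopInnerA]
    split
    · -- i + la > l.length - 1, hence i + la ≥ l.length and the drop is empty
      rename_i hstop
      have hlen : l.length ≤ i + la := by omega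
      rw [List.drop_eq_nil_of_le hlen]
      simp [runLen]
    · -- i + la ≤ l.length - 1 < l.length : the drop starts with l[i+la]
      rename_i hgo
      have hlt : i + la < l.length := by omega
      have hdrop : l.drop (i + la) = l[i + la] :: l.drop (i + la + 1) :=
        List.drop_eq_getElem_cons hlt
      have hgetD : l.getD (i + la) 0 = l[i + la] := List.getD_eq_getElem l 0 hlt
      rw [hdrop]
      simp only [runLen]
      split
      · rename_i heq
        have heq' : l.getD i 0 = l[i + la] := by rw [← hgetD]; exact beq_iff_eq.mp heq
        have hx : (l[i + la] == l.getD i 0) = true := by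
          rw [beq_iff_eq]; exact heq'.symm
        rw [if_pos hx]
        rw [ih (la + 1) (m + 1) (by omega)]
        have harith : i + (la + 1) = i + la + 1 := by omega
        rw [harith]
        simp only [Prod.mk.injEq]
        constructor <;> omega
      · rename_i hne
        have hne' : l.getD i 0 ≠ l[i + la] := by
          rw [← hgetD]; exact fun h => hne (beq_iff_eq.mpr h)
        have hx : ¬ ((l[i + la] == l.getD i 0) = true) := by
          rw [beq_iff_eq]; exact fun h => hne' h.symm
        rw [if_neg hx]
        simp

theorem loopOuterA_eq (l : List Int) : ∀ (fuel i : Nat), l.length - i < fuel →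
    loopOuterA l fuel i = gRuns (l.drop i) := by
  intro fuel
  induction fuel with
  | zero => intro i h; omega
  | succ fuel ih =>
    intro i hfuel
    simp only [loopOuterA]
    split
    · rename_i hlt
      have hi : i < l.length := by omega
      have hi1 : i + 1 < l.length := by omega
      have hdrop : l.drop i = l[i] :: l.drop (i + 1) := List.drop_eq_getElem_cons hi
      have hgetD : l.getD i 0 = l[i] := List.getD_eq_getElem l 0 hi
      rw [loopInnerA_eq l i hi l.length 1 0 (by omega)]
      rw [hdrop, gRuns_cons]
      simp only [Nat.zero_add, hgetD]
      by_cases h1 : runLen l[i] (l.drop (i + 1)) = 1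
      · simp [h1]
      · have hb : ((runLen l[i] (l.drop (i + 1)) == 1) : Bool) = false := by simp [h1]
        rw [hb, if_neg h1]
        simp only [Bool.false_eq_true, if_false]
        rw [ih (i + (1 + runLen l[i] (l.drop (i + 1)))) (by omega)]
        rw [List.drop_drop]
        have harith : i + (1 + runLen l[i] (l.drop (i + 1))) =
            i + 1 + runLen l[i] (l.drop (i + 1)) := by omega
        rw [harith]
    · rename_i hge
      -- drop i l has at most one element
      have hlen : (l.drop i).length ≤ 1 := by
        simp only [List.length_drop]; omega
      match hd : l.drop i with
      | [] => rfl
      | [x] => simp [runLen, gRuns, gRunsF]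
      | x :: y :: rest =>
        rw [hd] at hlen
        simp at hlen

theorem loopB_eq (l : List Int) : ∀ (p : Int) (c : Nat), 1 ≤ c →
    loopB l p c =
      (if c + runLen p l = 2 then true else gRuns (l.drop (runLen p l))) := by
  induction l with
  | nil =>
    intro p c hc
    simp only [loopB, runLen, Nat.add_zero, List.drop_nil]
    by_cases h : c = 2
    · simp [h]
    · simp [h, gRuns, gRunsF]
  | cons x rest ih =>
    intro p c hc
    simp only [loopB]
    have hc0 : (c != 0) = true := by simp; omega
    by_cases hx : x == p
    · have hcond : (c != 0 && x == p) = true := by simp [hc0, hx]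
      rw [hcond]
      simp only [if_true]
      rw [ih p (c + 1) (by omega)]
      have hrl : runLen p (x :: rest) = runLen p rest + 1 := by
        simp [runLen, hx]
      rw [hrl]
      have hdp : (x :: rest).drop (runLen p rest + 1) = rest.drop (runLen p rest) := by
        simp [List.drop_succ_cons]
      rw [hdp]
      have harith : c + (runLen p rest + 1) = c + 1 + runLen p rest := by omega
      rw [harith]
    · have hcond : (c != 0 && x == p) = false := by simp [hx]
      rw [hcond]
      simp only [Bool.false_eq_true, if_false]
      have hrl : runLen p (x :: rest) = 0 := by simp [runLen, hx]
      rw [hrl]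
      simp only [Nat.add_zero, List.drop_zero]
      by_cases h2 : c = 2
      · simp [h2]
      · have hb : ((c == 2) : Bool) = false := by simp [h2]
        rw [hb]
        simp only [Bool.false_eq_true, if_false, if_neg h2]
        rw [ih x 1 (by omega), gRuns_cons]
        by_cases h1 : runLen x rest = 1
        · simp [h1]
        · have h12 : ¬ (1 + runLen x rest = 2) := by omega
          rw [if_neg h12, if_neg h1]

theorem hasDouble_alt_eq_gRuns (l : List Int) : hasDouble_alt l = gRuns l := by
  cases l with
  | nil => rfl
  | cons x rest =>
    simp only [hasDouble_alt, loopB]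
    have hc0 : (((0 : Nat) != 0) && (x == (0 : Int))) = false := by simp
    rw [hc0]
    simp only [Bool.false_eq_true, if_false]
    have h02 : (((0 : Nat) == 2) : Bool) = false := by simp
    rw [h02]
    simp only [Bool.false_eq_true, if_false]
    rw [loopB_eq rest x 1 (by omega), gRuns_cons]
    by_cases h1 : runLen x rest = 1
    · simp [h1]
    · have h12 : ¬ (1 + runLen x rest = 2) := by omega
      rw [if_neg h12, if_neg h1]

-- ===== VERDICT (by name: the statement is the Claim_ definition above) =====
theorem hasDouble_spec : Claim_equal_hasDouble := by
  intro l _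
  unfold Spec_hasDouble hasDouble
  rw [loopOuterA_eq l (l.length + 1) 0 (by omega), List.drop_zero,
    hasDouble_alt_eq_gRuns]
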